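-- pv_equiv track=rewrite | github.com/nsa05605/AIPP | Backup-MIPP/policy/ligm.py | _get_joint_action_indices
-- ===== SOURCE A (Python) =====
-- import copy,itertools
--
-- def _get_joint_action_indices(valid_actions):
--     action_size = 28
--     indices=[]
--     for joint_action in itertools.product(*valid_actions):
--         index=0
--         for i,action_num in enumerate(joint_action):
--             index += (action_size ** i) * action_num
--         #note convert to integer since it is index
--         indices.append(int(index))
--     return indices
-- ===== SOURCE B (Python) =====
-- def _get_joint_action_indices(valid_actions):
--     # multiply-as-you-go recursion over the lists, right to left: no powers, no product tuples
--     if not valid_actions: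
--         return [0]
--     rest = _get_joint_action_indices(valid_actions[1:])
--     return [a + 28 * x for a in valid_actions[0] for x in rest]
-- ===== Notes on version B (the rewrite author's own statement) =====
-- stated objective: alternative
-- what changed: Replaces itertools.product plus a per-tuple power-sum with a right-to-left recursion that combines each action with the already-computed suffix indices via one multiply-add, so each output index costs O(1) instead of O(N).
import Mathlib
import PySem

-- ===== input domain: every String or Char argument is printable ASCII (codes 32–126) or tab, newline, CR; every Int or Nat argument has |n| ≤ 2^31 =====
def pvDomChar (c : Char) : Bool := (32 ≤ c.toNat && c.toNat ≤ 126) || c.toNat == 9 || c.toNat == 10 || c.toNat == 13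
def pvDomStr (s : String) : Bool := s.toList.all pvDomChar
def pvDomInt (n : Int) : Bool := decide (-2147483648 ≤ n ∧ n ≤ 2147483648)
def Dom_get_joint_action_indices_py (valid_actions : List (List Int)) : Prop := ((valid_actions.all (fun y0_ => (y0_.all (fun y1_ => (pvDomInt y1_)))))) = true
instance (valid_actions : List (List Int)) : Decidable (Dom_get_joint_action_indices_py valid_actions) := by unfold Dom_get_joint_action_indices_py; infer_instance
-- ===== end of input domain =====

-- B replaces the product/power-sum with a right-to-left multiply-add recursion.
-- ===== PORT A =====
-- itertools.product(*valid_actions): first list varies slowest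
def pvProdA (ls : List (List Int)) : List (List Int) :=
  match ls with
  | [] => [[]]
  | l :: rest => l.flatMap (fun a => (pvProdA rest).map (fun t => a :: t))

-- the inner for-loop: index += 28**i * action_num, i counting from `i`
def pvIndexFrom (i : Nat) (ja : List Int) : Int :=
  match ja with
  | [] => 0
  | a :: t => (28 : Int) ^ i * a + pvIndexFrom (i + 1) t

def get_joint_action_indices_py (valid_actions : List (List Int)) : List Int :=
  (pvProdA valid_actions).map (fun ja => pvIndexFrom 0 ja)

-- ===== PORT B =====
def get_joint_action_indices_py_alt (valid_actions : List (List Int)) : List Int :=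
  match valid_actions with
  | [] => [0]
  | l :: rest =>
    let r := get_joint_action_indices_py_alt rest
    l.flatMap (fun a => r.map (fun x => a + 28 * x))

-- ===== PRECONDITION & SPEC =====
def Spec_get_joint_action_indices_py (valid_actions : List (List Int)) (out : List Int) : Prop := out = get_joint_action_indices_py_alt valid_actions
instance (valid_actions : List (List Int)) (out : List Int) : Decidable (Spec_get_joint_action_indices_py valid_actions out) := by unfold Spec_get_joint_action_indices_py; infer_instance

-- ===== CLAIM (what is proved, stated in full; the proofs are below) =====
def Claim_equal_get_joint_action_indices_py : Prop := ∀ (valid_actions : List (List Int)), Dom_get_joint_action_indices_py valid_actions → Spec_get_joint_action_indices_py valid_actions (get_joint_action_indices_py valid_actions)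

-- ===== LEMMAS AND PROOFS =====

-- ===== VERDICT (by name: the statement is the Claim_ definition above) =====
theorem pvIndexFrom_succ (t : List Int) : ∀ i, pvIndexFrom (i + 1) t = 28 * pvIndexFrom i t := by
  induction t with
  | nil => intro i; simp [pvIndexFrom]
  | cons a t ih =>
    intro i
    simp [pvIndexFrom, ih, pow_succ]
    ring

theorem pvMain (ls : List (List Int)) :
    (pvProdA ls).map (fun ja => pvIndexFrom 0 ja) = get_joint_action_indices_py_alt ls := by
  induction ls with
  | nil => simp [pvProdA, pvIndexFrom, get_joint_action_indices_py_alt]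
  | cons l rest ih =>
    simp only [pvProdA, get_joint_action_indices_py_alt, List.map_flatMap, List.map_map]
    rw [← ih]
    congr 1
    funext a
    simp [Function.comp, pvIndexFrom, pvIndexFrom_succ]

theorem get_joint_action_indices_py_spec : Claim_equal_get_joint_action_indices_py := by
  intro va _
  unfold Spec_get_joint_action_indices_py get_joint_action_indices_py
  exact pvMain va
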